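-- pv_equiv track=rewrite | github.com/maknis3/m122_chess-project | chess_game.py | calculate_king_impact
-- ===== SOURCE A (Python) =====
-- def calculate_king_impact(row, col, board_matrix):
--     moves = [(-1, -1), (-1, 0), (-1, 1), (0, -1), (0, 1), (1, -1), (1, 0), (1, 1)]
--     impact_squares = []
--
--     for dr, dc in moves:
--         r, c = row + dr, col + dc
--         if 0 <= r < 8 and 0 <= c < 8:
--             impact_squares.append((r, c))
--
--     return impact_squares
-- ===== SOURCE B (Python) =====
-- def calculate_king_impact(row, col, board_matrix):
--     return [(r, c) for r in range(8) for c in range(8)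
--             if max(abs(r - row), abs(c - col)) == 1]
-- ===== Notes on version B (the rewrite author's own statement) =====
-- stated objective: alternative
-- what changed: Instead of enumerating the 8 king offsets with a bounds check, B scans all 64 board squares and keeps those at Chebyshev distance exactly 1 from (row, col); row-major scan order reproduces A's output order.
import Mathlib
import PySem

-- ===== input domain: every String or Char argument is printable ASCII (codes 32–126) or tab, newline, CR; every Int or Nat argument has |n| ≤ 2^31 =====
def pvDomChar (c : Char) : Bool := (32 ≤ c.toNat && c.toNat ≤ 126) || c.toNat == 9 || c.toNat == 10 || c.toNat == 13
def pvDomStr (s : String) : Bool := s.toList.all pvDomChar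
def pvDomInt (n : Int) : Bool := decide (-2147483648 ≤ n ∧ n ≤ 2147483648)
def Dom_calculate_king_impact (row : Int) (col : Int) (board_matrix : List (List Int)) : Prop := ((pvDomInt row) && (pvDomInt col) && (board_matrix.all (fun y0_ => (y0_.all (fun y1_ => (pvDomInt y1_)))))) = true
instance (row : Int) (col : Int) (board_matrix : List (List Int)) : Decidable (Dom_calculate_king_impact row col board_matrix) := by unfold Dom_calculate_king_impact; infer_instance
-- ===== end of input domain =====

-- B scans all 64 board squares keeping those at Chebyshev distance 1 from (row, col),
-- instead of enumerating the 8 king offsets with a bounds check (alternative decomposition).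

-- ===== PORT A =====
def calculate_king_impact (row : Int) (col : Int) (board_matrix : List (List Int)) : List (Int × Int) :=
  let moves : List (Int × Int) := [(-1, -1), (-1, 0), (-1, 1), (0, -1), (0, 1), (1, -1), (1, 0), (1, 1)]
  moves.foldl (fun impact_squares m =>
    let r := row + m.1
    let c := col + m.2
    if 0 ≤ r ∧ r < 8 ∧ 0 ≤ c ∧ c < 8 then impact_squares ++ [(r, c)] else impact_squares) []

-- ===== PORT B =====
def calculate_king_impact_alt (row : Int) (col : Int) (board_matrix : List (List Int)) : List (Int × Int) :=
  (PySem.List.pyRange 0 8 1).flatMap (fun r =>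
    (PySem.List.pyRange 0 8 1).filterMap (fun c =>
      if max (r - row).natAbs (c - col).natAbs = 1 then some (r, c) else none))

-- ===== PRECONDITION & SPEC =====
def Spec_calculate_king_impact (row : Int) (col : Int) (board_matrix : List (List Int)) (out : List (Int × Int)) : Prop := out = calculate_king_impact_alt row col board_matrix
instance (row : Int) (col : Int) (board_matrix : List (List Int)) (out : List (Int × Int)) : Decidable (Spec_calculate_king_impact row col board_matrix out) := by unfold Spec_calculate_king_impact; infer_instance

-- ===== CLAIM (what is proved, stated in full; the proofs are below) =====
def Claim_equal_calculate_king_impact : Prop := ∀ (row : Int) (col : Int) (board_matrix : List (List Int)), Dom_calculate_king_impact row col board_matrix → Spec_calculate_king_impact row col board_matrix (calculate_king_impact row col board_matrix)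

-- ===== LEMMAS AND PROOFS =====

-- far-out-of-range inputs: A appends nothing
theorem a_fold_nil (row col : Int) (l : List (Int × Int)) (acc : List (Int × Int))
    (h : ∀ m ∈ l, ¬(0 ≤ row + m.1 ∧ row + m.1 < 8 ∧ 0 ≤ col + m.2 ∧ col + m.2 < 8)) :
    l.foldl (fun impact_squares m =>
      if 0 ≤ row + m.1 ∧ row + m.1 < 8 ∧ 0 ≤ col + m.2 ∧ col + m.2 < 8 then
        impact_squares ++ [(row + m.1, col + m.2)] else impact_squares) acc = acc := by
  induction l generalizing acc with
  | nil => rfl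
  | cons a t ih =>
    rw [List.foldl_cons, if_neg (h a (List.mem_cons_self))]
    exact ih acc fun m hm => h m (List.mem_cons_of_mem _ hm)

theorem a_out (row col : Int) (bm : List (List Int))
    (h : row ≤ -2 ∨ 9 ≤ row ∨ col ≤ -2 ∨ 9 ≤ col) :
    calculate_king_impact row col bm = [] :=
  a_fold_nil row col _ [] (by intro m hm; fin_cases hm <;> simp <;> omega)

-- far-out-of-range inputs: every square of B's scan is at Chebyshev distance ≥ 2
theorem alt_out (row col : Int) (bm : List (List Int))
    (h : row ≤ -2 ∨ 9 ≤ row ∨ col ≤ -2 ∨ 9 ≤ col) :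
    calculate_king_impact_alt row col bm = [] := by
  unfold calculate_king_impact_alt
  rw [List.flatMap_eq_nil_iff]
  intro r hr
  rw [List.filterMap_eq_nil_iff]
  intro c hc
  rw [PySem.List.mem_pyRange_one] at hr hc
  rw [if_neg]
  omega

-- ===== VERDICT (by name: the statement is the Claim_ definition above) =====
theorem calculate_king_impact_spec : Claim_equal_calculate_king_impact := by
  intro row col bm _
  unfold Spec_calculate_king_impact
  by_cases hr : -1 ≤ row ∧ row ≤ 8
  · by_cases hc : -1 ≤ col ∧ col ≤ 8
    · obtain ⟨hr1, hr2⟩ := hr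
      obtain ⟨hc1, hc2⟩ := hc
      interval_cases row <;> interval_cases col <;> rfl
    · rw [a_out row col bm (by omega), alt_out row col bm (by omega)]
  · rw [a_out row col bm (by omega), alt_out row col bm (by omega)]
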